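-- pv_equiv track=rewrite | github.com/Jonathan-Woo/prosperity | 2024/round_1/trader.py | max_vol_quote
-- ===== SOURCE A (Python) =====
-- def max_vol_quote(order_dict, buy):
--     """The highest vol is indicative of actual market sentiment;
--     this is what we tried to do earlier with the vwap"""
--     best_quote, best_vol = 0, -float('inf')
--     total_vol = 0
--     for item in order_dict:
--         vol = order_dict[item]
--         if buy==0:
--             vol *= -1
--         total_vol += vol
--         if vol > best_vol:
--             best_vol, best_quote = vol, item
--     return total_vol, best_quote
-- ===== SOURCE B (Python) =====
-- def max_vol_quote(order_dict, buy):
--     """Sort-then-pick: rank the quotes by signed volume (descending, stable)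
--     and take the top one; total volume is a separate signed sum."""
--     sign = -1 if buy == 0 else 1
--     ranked = sorted(order_dict.items(), key=lambda kv: sign * kv[1], reverse=True)
--     if not ranked:
--         return 0, 0
--     total_vol = sign * sum(order_dict.values())
--     return total_vol, ranked[0][0]
-- ===== Notes on version B (the rewrite author's own statement) =====
-- stated objective: alternative
-- what changed: Replaces A's single fused accumulator loop (running best_quote/best_vol with a -inf sentinel plus a running total) by a sort-then-pick: stable descending sort of the items by signed volume, whose first element is the best quote (stability preserves A's first-encountered tie-break), with the total as a separate signed sum.
import Mathlib
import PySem

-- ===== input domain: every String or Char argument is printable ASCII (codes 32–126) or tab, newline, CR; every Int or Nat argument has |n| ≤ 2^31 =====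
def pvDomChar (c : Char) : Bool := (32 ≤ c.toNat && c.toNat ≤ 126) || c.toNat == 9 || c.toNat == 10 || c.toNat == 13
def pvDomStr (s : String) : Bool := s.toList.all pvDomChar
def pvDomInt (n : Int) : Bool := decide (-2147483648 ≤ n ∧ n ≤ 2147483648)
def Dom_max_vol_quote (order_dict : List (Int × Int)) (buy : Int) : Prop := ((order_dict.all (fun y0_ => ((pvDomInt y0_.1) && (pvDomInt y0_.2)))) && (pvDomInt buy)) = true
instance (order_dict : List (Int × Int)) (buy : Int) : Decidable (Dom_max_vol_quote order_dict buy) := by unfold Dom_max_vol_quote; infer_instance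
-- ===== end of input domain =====

-- B replaces A's fused accumulator loop by a stable descending sort of the items
-- by signed volume (its first element is the best quote) plus a separate signed sum.

-- ===== PORT A =====
-- best_vol starts at -float('inf'); modelled as `none`, strictly below every Int
def pyNegInfLt (bv : Option Int) (vol : Int) : Bool :=
  match bv with
  | none => true
  | some b => decide (b < vol)

def max_vol_quote (order_dict : List (Int × Int)) (buy : Int) : Int × Int :=
  -- state: (best_quote, best_vol, total_vol); `vol = order_dict[item]` is the
  -- dict lookup at the iterated key (always present, so the default 0 is never used)
  let s := order_dict.foldl
    (fun (st : Int × Option Int × Int) item =>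
      let vol := PySem.Dict.getD ⟨order_dict⟩ item.1 0
      let vol := if buy == 0 then vol * (-1) else vol
      let total_vol := st.2.2 + vol
      if pyNegInfLt st.2.1 vol then (item.1, some vol, total_vol)
      else (st.1, st.2.1, total_vol))
    (0, none, 0)
  (s.2.2, s.1)

-- ===== PORT B =====
def max_vol_quote_alt (order_dict : List (Int × Int)) (buy : Int) : Int × Int :=
  let sign : Int := if buy == 0 then -1 else 1
  let ranked := PySem.List.sorted order_dict (fun kv => sign * kv.2) true
  match ranked with
  | [] => (0, 0)
  | (k, _) :: _ => (sign * (order_dict.map (fun p => p.2)).sum, k)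

-- ===== PRECONDITION & SPEC =====
-- Pre_ excludes duplicate keys: such lists do not represent any Python dict
-- (Python A, fed such a literal, raises TypeError on `order_dict[item]`).
def Pre_max_vol_quote (order_dict : List (Int × Int)) (buy : Int) : Prop :=
  (order_dict.map Prod.fst).Nodup
instance (order_dict : List (Int × Int)) (buy : Int) : Decidable (Pre_max_vol_quote order_dict buy) := by unfold Pre_max_vol_quote; infer_instance
def pvWitness_max_vol_quote : (List (Int × Int)) × Int := ([(10, 3), (11, 5)], 1)

def Spec_max_vol_quote (order_dict : List (Int × Int)) (buy : Int) (out : Int × Int) : Prop := out = max_vol_quote_alt order_dict buy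
instance (order_dict : List (Int × Int)) (buy : Int) (out : Int × Int) : Decidable (Spec_max_vol_quote order_dict buy out) := by unfold Spec_max_vol_quote; infer_instance

-- ===== CLAIM (what is proved, stated in full; the proofs are below) =====
def Claim_equal_max_vol_quote : Prop := ∀ (order_dict : List (Int × Int)) (buy : Int), Dom_max_vol_quote order_dict buy → Pre_max_vol_quote order_dict buy → Spec_max_vol_quote order_dict buy (max_vol_quote order_dict buy)

-- ===== LEMMAS AND PROOFS =====

-- lookup in a duplicate-free assoc list returns the pair's own value
theorem lookup_nodup {l : List (Int × Int)} (h : (l.map Prod.fst).Nodup)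
    {p : Int × Int} (hp : p ∈ l) : PySem.Dict.getD ⟨l⟩ p.1 0 = p.2 := by
  induction l with
  | nil => cases hp
  | cons q t ih =>
    simp only [List.map_cons, List.nodup_cons] at h
    simp [PySem.Dict.getD, PySem.Dict.get?]
    rcases List.mem_cons.mp hp with rfl | hpt
    · simp
    · have hne : ¬ (q.1 == p.1) = true := by
        simp only [beq_iff_eq]
        intro he
        exact h.1 (by simpa [he] using List.mem_map_of_mem (f := Prod.fst) hpt)
      simp only [List.find?_cons, hne]
      have := ih h.2 hpt
      simpa [PySem.Dict.getD, PySem.Dict.get?] using this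

-- A's loop step and B's sort step (insertion into the descending-ranked list), named for the proofs
def stepA (buy : Int) (st : Int × Option Int × Int) (item : Int × Int) : Int × Option Int × Int :=
  let vol := item.2
  let vol := if buy == 0 then vol * (-1) else vol
  let total_vol := st.2.2 + vol
  if pyNegInfLt st.2.1 vol then (item.1, some vol, total_vol)
  else (st.1, st.2.1, total_vol)

-- A's signed volume of an item, exactly as A computes it
def sv (buy : Int) (p : Int × Int) : Int := if buy == 0 then p.2 * (-1) else p.2

def bef (buy : Int) (x h : Int × Int) : Bool :=
  decide ((if buy == 0 then (-1 : Int) else 1) * h.2 < (if buy == 0 then (-1 : Int) else 1) * x.2)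

theorem sv_eq (buy : Int) (p : Int × Int) :
    sv buy p = (if buy == 0 then (-1 : Int) else 1) * p.2 := by
  unfold sv; split <;> ring

theorem bef_eq (buy : Int) (x h : Int × Int) :
    bef buy x h = decide (sv buy h < sv buy x) := by
  unfold bef; rw [sv_eq, sv_eq]

-- the total-volume component of A's fold
theorem fold_total (buy : Int) (l : List (Int × Int)) :
    ∀ st : Int × Option Int × Int,
      (l.foldl (stepA buy) st).2.2
        = st.2.2 + (if buy == 0 then (-1 : Int) else 1) * (l.map (fun p => p.2)).sum := by
  induction l with
  | nil => intro st; simp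
  | cons p t ih =>
    intro st
    simp only [List.foldl_cons, ih, List.map_cons, List.sum_cons]
    unfold stepA
    by_cases hb : buy == 0 <;> simp [hb] <;> split <;> simp <;> ring

-- the best-quote invariant: A's running best is the head of B's insertion-sort accumulator
theorem fold_best (buy : Int) :
    ∀ (l rest : List (Int × Int)) (p : Int × Int) (tv : Int),
      (l.foldl (stepA buy) (p.1, some (sv buy p), tv)).1
        = ((l.foldl (fun acc x => PySem.List.insertBy (bef buy) x acc) (p :: rest)).headD (0, 0)).1 := by
  intro l
  induction l with
  | nil => intro rest p tv; simp
  | cons x t ih =>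
    intro rest p tv
    have hstep : stepA buy (p.1, some (sv buy p), tv) x
        = if sv buy p < sv buy x
          then (x.1, some (sv buy x), tv + sv buy x)
          else (p.1, some (sv buy p), tv + sv buy x) := by
      unfold stepA pyNegInfLt sv
      by_cases hlt : sv buy p < sv buy x <;> simp [sv, hlt] at *
    have hins : PySem.List.insertBy (bef buy) x (p :: rest)
        = if sv buy p < sv buy x then x :: p :: rest
          else p :: PySem.List.insertBy (bef buy) x rest := by
      show (if bef buy x p then x :: p :: rest else p :: PySem.List.insertBy (bef buy) x rest) = _
      rw [bef_eq]
      by_cases hlt : sv buy p < sv buy x <;> simp [hlt]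
    simp only [List.foldl_cons, hstep, hins]
    by_cases hlt : sv buy p < sv buy x
    · rw [if_pos hlt, if_pos hlt]; exact ih (p :: rest) x (tv + sv buy x)
    · rw [if_neg hlt, if_neg hlt]; exact ih (PySem.List.insertBy (bef buy) x rest) p (tv + sv buy x)

-- ===== VERDICT (by name: the statement is the Claim_ definition above) =====
theorem max_vol_quote_spec : Claim_equal_max_vol_quote := by
  intro od buy _ hpre
  unfold Spec_max_vol_quote max_vol_quote max_vol_quote_alt
  rw [PySem.List.foldl_congr_mem od _ (stepA buy) (0, none, 0)
    (fun acc x hx => by unfold stepA; rw [lookup_nodup hpre hx])]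
  cases od with
  | nil => simp [PySem.List.sorted]
  | cons h t =>
    have hsorted : PySem.List.sorted (h :: t) (fun kv : Int × Int => (if buy == 0 then (-1 : Int) else 1) * kv.2) true
        = (h :: t).foldl (fun acc x => PySem.List.insertBy (bef buy) x acc) [] := by
      rw [PySem.List.sorted_rev_eq_foldl_insertBy]
      rfl
    have hne : PySem.List.sorted (h :: t) (fun kv : Int × Int => (if buy == 0 then (-1 : Int) else 1) * kv.2) true ≠ [] := by
      simp [PySem.List.sorted_eq_nil_iff]
    -- name the sorted list and split it
    rcases hq : PySem.List.sorted (h :: t) (fun kv : Int × Int => (if buy == 0 then (-1 : Int) else 1) * kv.2) true with _ | ⟨q, s⟩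
    · exact absurd hq hne
    -- first loop iteration of A: best_vol goes from -inf to sv h
    have hfirst : stepA buy (0, none, 0) h = (h.1, some (sv buy h), 0 + sv buy h) := by
      unfold stepA pyNegInfLt sv; simp
    have hbest : ((h :: t).foldl (stepA buy) (0, none, 0)).1 = q.1 := by
      show ((t.foldl (stepA buy) (stepA buy (0, none, 0) h))).1 = q.1
      rw [hfirst, fold_best buy t [] h (0 + sv buy h)]
      have : (h :: t).foldl (fun acc x => PySem.List.insertBy (bef buy) x acc) [] = q :: s := by
        rw [← hsorted, hq]
      simp only [List.foldl_cons] at this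
      have hfirstB : PySem.List.insertBy (bef buy) h [] = [h] := rfl
      rw [hfirstB] at this
      rw [this]
      rfl
    have htot : ((h :: t).foldl (stepA buy) (0, none, 0)).2.2
        = (if buy == 0 then (-1 : Int) else 1) * ((h :: t).map (fun p => p.2)).sum := by
      simpa using fold_total buy (h :: t) (0, none, 0)
    show (((h :: t).foldl (stepA buy) (0, none, 0)).2.2, ((h :: t).foldl (stepA buy) (0, none, 0)).1)
        = (match PySem.List.sorted (h :: t) (fun kv : Int × Int => (if buy == 0 then (-1 : Int) else 1) * kv.2) true with
           | [] => ((0 : Int), (0 : Int))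
           | (k, _) :: _ => ((if buy == 0 then (-1 : Int) else 1) * ((h :: t).map (fun p => p.2)).sum, k))
    rw [hq, htot, hbest]
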